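-- pv_equiv track=rewrite | github.com/NikolozTsereteli/GOA-homework | level 024/Homework/hw2.py | change_list
-- ===== SOURCE A (Python) =====
-- def change_list(listt):
--     New_list = []
--     consonants = "bcdfghjklmnpqrstvwxyz"
--     for word in listt:
--         for char in word:
--             if char.lower() in consonants:
--                 New_list.append(char)
--     sorted_list = sorted(New_list)
--
--     return sorted_list
-- ===== SOURCE B (Python) =====
-- def change_list(listt):
--     consonants = "bcdfghjklmnpqrstvwxyz"
--     counts = {}
--     for word in listt:
--         for char in word:
--             if char.lower() in consonants:
--                 counts[char] = counts.get(char, 0) + 1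
--     result = []
--     for char in sorted(counts):
--         result += [char] * counts[char]
--     return result
-- ===== Notes on version B (the rewrite author's own statement) =====
-- stated objective: alternative
-- what changed: Replaces collect-all-then-comparison-sort (sorted()) with a counting sort: one pass tallies each kept character into a dict keyed by the original character, then the result is rebuilt by iterating the sorted distinct characters and repeating each count-many times.
import Mathlib
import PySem

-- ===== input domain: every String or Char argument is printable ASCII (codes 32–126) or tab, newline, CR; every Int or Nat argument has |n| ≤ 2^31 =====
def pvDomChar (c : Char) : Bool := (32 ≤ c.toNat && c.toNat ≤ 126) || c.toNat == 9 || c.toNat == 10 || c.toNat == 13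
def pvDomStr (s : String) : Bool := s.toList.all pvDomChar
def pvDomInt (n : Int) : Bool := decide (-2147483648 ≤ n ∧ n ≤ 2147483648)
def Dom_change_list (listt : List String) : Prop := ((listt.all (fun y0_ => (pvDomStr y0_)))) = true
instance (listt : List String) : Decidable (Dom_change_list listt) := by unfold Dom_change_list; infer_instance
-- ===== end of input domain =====

-- B replaces A's collect-then-comparison-sort with a frequency table keyed by the original
-- character plus an ordered reconstruction over the sorted distinct characters (counting sort);
-- objective: alternative algorithm of similar cost.

-- ===== PORT A =====
def change_list (listt : List String) : List String :=
  let consonants := "bcdfghjklmnpqrstvwxyz"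
  let newList := listt.foldl (fun acc word =>
      word.toList.foldl (fun acc char =>
        -- char.lower() on a one-char string is lowerChar; 'in' on strings is Str.isIn
        if PySem.Str.isIn (String.mk [PySem.Chars.lowerChar char]) consonants then
          acc ++ [String.mk [char]]
        else acc) acc) []
  PySem.List.sorted newList (fun x => x)

-- ===== PORT B =====
def change_list_alt (listt : List String) : List String :=
  let consonants := "bcdfghjklmnpqrstvwxyz"
  let counts := listt.foldl (fun counts word =>
      word.toList.foldl (fun counts char =>
        if PySem.Str.isIn (String.mk [PySem.Chars.lowerChar char]) consonants then
          counts.insert (String.mk [char]) (counts.getD (String.mk [char]) 0 + 1)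
        else counts) counts) (PySem.Dict.empty : PySem.Dict String Int)
  (PySem.List.sorted counts.keys (fun x => x)).foldl
    -- counts[char]: char is a key of counts, so getD's default is never read;
    -- the count is a positive Int, so .toNat is exact for [char] * counts[char]
    (fun result char => result ++ List.replicate (counts.getD char 0).toNat char) []

-- ===== PRECONDITION & SPEC =====
def Spec_change_list (listt : List String) (out : List String) : Prop := out = change_list_alt listt
instance (listt : List String) (out : List String) : Decidable (Spec_change_list listt out) := by unfold Spec_change_list; infer_instance

-- ===== CLAIM (what is proved, stated in full; the proofs are below) =====
def Claim_equal_change_list : Prop := ∀ (listt : List String), Dom_change_list listt → Spec_change_list listt (change_list listt)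

-- ===== LEMMAS AND PROOFS =====

-- the character test both programs use, and the multiset of kept characters (as 1-char strings)
def pvKeep (c : Char) : Bool :=
  PySem.Str.isIn (String.mk [PySem.Chars.lowerChar c]) "bcdfghjklmnpqrstvwxyz"

def pvKept (listt : List String) : List String :=
  listt.flatMap (fun w => (w.toList.filter pvKeep).map (fun c => String.mk [c]))

def pvCounts (listt : List String) : PySem.Dict String Int :=
  listt.foldl (fun counts word =>
      word.toList.foldl (fun counts char =>
        if pvKeep char then
          counts.insert (String.mk [char]) (counts.getD (String.mk [char]) 0 + 1)
        else counts) counts) PySem.Dict.empty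

theorem change_list_eq_sorted_kept (listt : List String) :
    change_list listt = PySem.List.sorted (pvKept listt) (fun x => x) := by
  unfold change_list pvKept pvKeep
  simp only [PySem.List.foldl_append_if, PySem.List.foldl_append_eq_flatMap, List.nil_append]

theorem counts_eq_counter (listt : List String) :
    pvCounts listt = PySem.Dict.counter (pvKept listt) := by
  unfold pvCounts
  rw [← PySem.Dict.foldl_insert_getD_add_one_eq_counter]
  unfold pvKept
  rw [List.foldl_flatMap]
  have h : (fun (d : PySem.Dict String Int) (w : String) =>
        ((w.toList.filter pvKeep).map (fun c => String.mk [c])).foldl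
          (fun d x => d.insert x (d.getD x 0 + 1)) d)
      = (fun d w => w.toList.foldl (fun counts char =>
          if pvKeep char then
            counts.insert (String.mk [char]) (counts.getD (String.mk [char]) 0 + 1)
          else counts) d) := by
    funext d w
    rw [List.foldl_map, List.foldl_filter]
  rw [h]

theorem count_flatMap_replicate {α : Type} [BEq α] [LawfulBEq α]
    (n : α → Nat) (a : α) (ks : List α) (hnd : ks.Nodup) :
    ((ks.flatMap fun k => List.replicate (n k) k).count a) = if a ∈ ks then n a else 0 := by
  induction ks with
  | nil => simp
  | cons k t ih =>
    rcases List.nodup_cons.mp hnd with ⟨hk, ht⟩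
    simp only [List.flatMap_cons, List.count_append, List.count_replicate, ih ht, List.mem_cons]
    by_cases hak : k = a
    · subst hak
      simp [hk]
    · by_cases hat : a ∈ t <;> simp [hat, hak, Ne.symm hak]

theorem pairwise_le_flatMap_replicate {α : Type} [LinearOrder α]
    (n : α → Nat) (ks : List α) (h : ks.Pairwise (· < ·)) :
    (ks.flatMap fun k => List.replicate (n k) k).Pairwise (· ≤ ·) := by
  induction ks with
  | nil => simp
  | cons k t ih =>
    rcases List.pairwise_cons.mp h with ⟨hk, ht⟩
    simp only [List.flatMap_cons]
    refine List.pairwise_append.mpr ⟨?_, ih ht, ?_⟩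
    · exact List.pairwise_replicate.mpr (Or.inr le_rfl)
    · intro a ha b hb
      obtain ⟨k', hk', hb'⟩ := List.mem_flatMap.mp hb
      rw [List.eq_of_mem_replicate ha, List.eq_of_mem_replicate hb']
      exact le_of_lt (hk k' hk')

theorem sorted_eq_counting_sort (L : List String) :
    PySem.List.sorted L (fun x => x)
      = (PySem.List.sorted (PySem.Set.ofList L) (fun x => x)).flatMap
          (fun k => List.replicate (L.count k) k) := by
  have hnd : (PySem.List.sorted (PySem.Set.ofList L) (fun x => x)).Nodup :=
    (PySem.List.sorted_perm _ _ _).nodup_iff.mpr (PySem.Set.nodup_ofList L)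
  refine PySem.List.sorted_id_eq_of_perm_of_pairwise _ _ ?_ ?_
  · refine List.perm_iff_count.mpr (fun a => ?_)
    rw [count_flatMap_replicate _ a _ hnd]
    by_cases ha : a ∈ L
    · rw [if_pos (by rwa [PySem.List.mem_sorted, PySem.Set.mem_ofList])]
    · rw [if_neg (by rwa [PySem.List.mem_sorted, PySem.Set.mem_ofList]),
        Eq.comm, List.count_eq_zero]
      exact ha
  · exact pairwise_le_flatMap_replicate _ _ (PySem.List.sorted_ofList_pairwise_lt L)

-- ===== VERDICT (by name: the statement is the Claim_ definition above) =====
theorem change_list_spec : Claim_equal_change_list := by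
  intro listt _
  unfold Spec_change_list
  rw [change_list_eq_sorted_kept]
  unfold change_list_alt
  show _ = List.foldl
      (fun result char => result ++ List.replicate ((pvCounts listt).getD char 0).toNat char) []
      (PySem.List.sorted (pvCounts listt).keys fun x => x)
  rw [counts_eq_counter]
  simp only [PySem.Dict.keys_counter, PySem.Dict.getD_counter, Int.toNat_natCast,
    PySem.List.foldl_append_eq_flatMap, List.nil_append]
  exact sorted_eq_counting_sort (pvKept listt)
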